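-- pv_equiv track=rewrite | github.com/cefn/blueshrimp | Code7/lib/python/code7/__init__.py | encode7
-- ===== SOURCE A (Python) =====
-- def encode7(srcbytes):
--
-- 	dstbytes = []
-- 	overflowbyte = 0
-- 	overflowpos = 0
--
-- 	for srcpos, srcbyte in enumerate(srcbytes):
--
-- 		overflowbyte |= (srcbyte & 0x80) >> (overflowpos + 1)
-- 		overflowpos += 1
--
-- 		dstbytes.append(srcbyte & ~0x80)
--
-- 		if(overflowpos == 7 or srcpos == len(srcbytes) - 1):
-- 			dstbytes.append(overflowbyte);
-- 			overflowbyte = 0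
-- 			overflowpos = 0
--
-- 	return dstbytes
-- ===== SOURCE B (Python) =====
-- def encode7(srcbytes):
-- 	dstbytes = []
-- 	for i in range(0, len(srcbytes), 7):
-- 		group = srcbytes[i:i+7]
-- 		overflowbyte = 0
-- 		for j, b in enumerate(group):
-- 			dstbytes.append(b & ~0x80)
-- 			overflowbyte |= (b & 0x80) >> (j + 1)
-- 		dstbytes.append(overflowbyte)
-- 	return dstbytes
-- ===== Notes on version B (the rewrite author's own statement) =====
-- stated objective: simpler
-- what changed: Replaced the running overflow-counter with inline flush conditions by iterating over 7-byte chunks (range step 7): each chunk's masked bytes and its overflow byte are emitted per chunk, with no mutable counter or end-of-list test.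
import Mathlib
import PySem

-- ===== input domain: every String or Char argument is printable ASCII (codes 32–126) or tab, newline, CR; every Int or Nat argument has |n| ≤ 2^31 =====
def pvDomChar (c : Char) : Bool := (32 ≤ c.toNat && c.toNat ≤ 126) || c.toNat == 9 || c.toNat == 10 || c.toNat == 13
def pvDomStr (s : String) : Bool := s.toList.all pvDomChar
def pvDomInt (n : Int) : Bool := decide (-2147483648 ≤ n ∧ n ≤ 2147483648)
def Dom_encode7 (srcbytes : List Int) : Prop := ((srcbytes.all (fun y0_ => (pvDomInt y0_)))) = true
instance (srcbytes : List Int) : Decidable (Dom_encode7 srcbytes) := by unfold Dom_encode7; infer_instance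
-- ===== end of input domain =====

-- B iterates over 7-byte chunks (range step 7) instead of A's running counter with inline flushes; same output, same cost (simpler decomposition).

-- ===== PORT A =====
-- A's loop over enumerate(srcbytes) with state (dstbytes, overflowbyte, overflowpos)
def encode7 (srcbytes : List Int) : List Int :=
  ((PySem.List.enumerate srcbytes 0).foldl
    (fun (st : List Int × Int × Int) (p : Int × Int) =>
      let ob := PySem.Int.bor st.2.1 ((PySem.Int.band p.2 0x80) >>> (st.2.2 + 1).toNat)
      let op := st.2.2 + 1
      let dst := st.1 ++ [PySem.Int.band p.2 (Int.not 0x80)]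
      if op = 7 ∨ p.1 = (srcbytes.length : Int) - 1 then (dst ++ [ob], 0, 0)
      else (dst, ob, op))
    ([], 0, 0)).1

-- ===== PORT B =====
-- B's loop over range(0, len, 7); inner loop over enumerate(group) with state (dstbytes, overflowbyte)
def encode7_alt (srcbytes : List Int) : List Int :=
  (PySem.List.pyRange 0 srcbytes.length 7).foldl
    (fun (dst : List Int) (i : Int) =>
      let group := PySem.List.slice srcbytes (some i) (some (i + 7))
      let st := (PySem.List.enumerate group 0).foldl
        (fun (st : List Int × Int) (p : Int × Int) =>
          (st.1 ++ [PySem.Int.band p.2 (Int.not 0x80)],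
           PySem.Int.bor st.2 ((PySem.Int.band p.2 0x80) >>> (p.1 + 1).toNat)))
        (dst, 0)
      st.1 ++ [st.2])
    []

-- ===== PRECONDITION & SPEC =====
def Spec_encode7 (srcbytes : List Int) (out : List Int) : Prop := out = encode7_alt srcbytes
instance (srcbytes : List Int) (out : List Int) : Decidable (Spec_encode7 srcbytes out) := by unfold Spec_encode7; infer_instance

-- ===== CLAIM (what is proved, stated in full; the proofs are below) =====
def Claim_equal_encode7 : Prop := ∀ (srcbytes : List Int), Dom_encode7 srcbytes → Spec_encode7 srcbytes (encode7 srcbytes)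

-- ===== LEMMAS AND PROOFS =====

-- overflow byte accumulated over a group whose first element has index k
def obFrom : List Int → Int → Int → Int
  | [], _, o => o
  | b :: t, k, o => obFrom t (k + 1) (PySem.Int.bor o ((PySem.Int.band b 0x80) >>> (k + 1).toNat))

-- common chunk-recursion characterisation both ports are reduced to
def chunkRec (l : List Int) : List Int :=
  if l = [] then []
  else (l.take 7).map (fun b => PySem.Int.band b (Int.not 0x80))
       ++ [obFrom (l.take 7) 0 0] ++ chunkRec (l.drop 7)
  termination_by l.length
  decreasing_by
    rename_i h
    have : l.length ≠ 0 := by simpa using h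
    simp only [List.length_drop]
    omega

-- A's loop body with the captured total length n
def stepA (n : Int) : List Int × Int × Int → Int × Int → List Int × Int × Int :=
  fun st p =>
    let ob := PySem.Int.bor st.2.1 ((PySem.Int.band p.2 0x80) >>> (st.2.2 + 1).toNat)
    let op := st.2.2 + 1
    let dst := st.1 ++ [PySem.Int.band p.2 (Int.not 0x80)]
    if op = 7 ∨ p.1 = n - 1 then (dst ++ [ob], 0, 0) else (dst, ob, op)

-- B's outer-loop body with the captured source list
def stepB (xs : List Int) : List Int → Int → List Int :=
  fun dst i =>
    let group := PySem.List.slice xs (some i) (some (i + 7))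
    let st := (PySem.List.enumerate group 0).foldl
      (fun (st : List Int × Int) (p : Int × Int) =>
        (st.1 ++ [PySem.Int.band p.2 (Int.not 0x80)],
         PySem.Int.bor st.2 ((PySem.Int.band p.2 0x80) >>> (p.1 + 1).toNat)))
      (dst, 0)
    st.1 ++ [st.2]

-- B's inner fold appends the masked group and computes obFrom
theorem alt_inner (g : List Int) (s : Int) (d : List Int) (o : Int) :
    (PySem.List.enumerate g s).foldl
      (fun (st : List Int × Int) (p : Int × Int) =>
        (st.1 ++ [PySem.Int.band p.2 (Int.not 0x80)],
         PySem.Int.bor st.2 ((PySem.Int.band p.2 0x80) >>> (p.1 + 1).toNat)))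
      (d, o)
    = (d ++ g.map (fun b => PySem.Int.band b (Int.not 0x80)), obFrom g s o) := by
  induction g generalizing s d o with
  | nil => simp [PySem.List.enumerate_nil, obFrom]
  | cons b t ih => simp [PySem.List.enumerate_cons, obFrom, ih]

theorem pyRange7_nil (a b : Int) (h : b ≤ a) : PySem.List.pyRange a b 7 = [] := by
  rw [PySem.List.pyRange_of_pos a b (by norm_num)]
  rw [if_neg (by omega)]
  simp

theorem pyRange7_cons (a b : Int) (h : a < b) :
    PySem.List.pyRange a b 7 = a :: PySem.List.pyRange (a + 7) b 7 := by
  rw [PySem.List.pyRange_of_pos a b (by norm_num),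
      PySem.List.pyRange_of_pos (a + 7) b (by norm_num)]
  rw [if_pos h]
  have hcnt : ((b - a + 7 - 1) / 7).toNat
      = (if a + 7 < b then ((b - (a + 7) + 7 - 1) / 7).toNat else 0) + 1 := by
    split_ifs with h2 <;> omega
  rw [hcnt, List.range_succ_eq_map]
  simp only [List.map_cons, List.map_map]
  congr 1
  · norm_num
  · apply List.map_congr_left
    intro k _
    simp only [Function.comp_apply]
    push_cast
    ring

-- B's outer loop from chunk start a computes chunkRec of the remaining suffix
theorem altLoop (xs : List Int) (a : Int) (d : List Int) (ha : 0 ≤ a) :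
    (PySem.List.pyRange a xs.length 7).foldl (stepB xs) d
      = d ++ chunkRec (xs.drop a.toNat) := by
  induction hfuel : xs.length - a.toNat using Nat.strong_induction_on generalizing a d with
  | _ m ih =>
    subst hfuel
    by_cases hend : (xs.length : Int) ≤ a
    · rw [pyRange7_nil _ _ hend]
      have hd : xs.drop a.toNat = [] := by
        apply List.drop_eq_nil_of_le
        omega
      rw [hd, chunkRec]
      simp
    · have hlt : a < (xs.length : Int) := by omega
      rw [pyRange7_cons _ _ hlt, List.foldl_cons]
      have hstep : stepB xs d a
          = d ++ ((xs.drop a.toNat).take 7).map (fun b => PySem.Int.band b (Int.not 0x80))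
              ++ [obFrom ((xs.drop a.toNat).take 7) 0 0] := by
        have h7 : (a + 7).toNat - a.toNat = 7 := by omega
        simp only [stepB]
        rw [PySem.List.slice_toNat xs ha (by omega), h7, alt_inner]
      rw [hstep]
      rw [ih (xs.length - (a + 7).toNat) (by omega) (a + 7) _ (by omega) rfl]
      have hsuf : xs.drop (a + 7).toNat = (xs.drop a.toNat).drop 7 := by
        rw [List.drop_drop]
        congr 1
        omega
      rw [hsuf]
      conv_rhs => rw [chunkRec]
      rw [if_neg (by
        intro hnil
        have := congrArg List.length hnil
        simp at this
        omega)]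
      simp

-- A's loop over one group with no early flush and a flush exactly at the last byte
theorem runGroup (n : Int) (g : List Int) (s op o : Int) (d : List Int)
    (hg : g ≠ [])
    (hlast : op + g.length = 7 ∨ s + g.length = n)
    (h7 : op + g.length ≤ 7) (hn : s + g.length ≤ n) :
    (PySem.List.enumerate g s).foldl (stepA n) (d, o, op)
      = (d ++ g.map (fun b => PySem.Int.band b (Int.not 0x80)) ++ [obFrom g op o], 0, 0) := by
  induction g generalizing s op o d with
  | nil => exact absurd rfl hg
  | cons b t ih =>
    rw [PySem.List.enumerate_cons, List.foldl_cons]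
    by_cases ht : t = []
    · subst ht
      simp only [List.length_cons, List.length_nil] at hlast
      have hcond : op + 1 = 7 ∨ s = n - 1 := by omega
      simp only [stepA]
      rw [if_pos hcond]
      rw [PySem.List.enumerate_nil, List.foldl_nil]
      simp [obFrom]
    · have htl : (1:Int) ≤ t.length := by
        cases t with
        | nil => exact absurd rfl ht
        | cons x xs => simp
      simp only [List.length_cons] at hlast h7 hn
      push_cast at hlast h7 hn
      have hcond : ¬ (op + 1 = 7 ∨ s = n - 1) := by omega
      simp only [stepA]
      rw [if_neg hcond]
      rw [ih _ _ _ _ ht (by omega) (by omega) (by omega)]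
      simp [obFrom]

-- A's loop from a fresh state anywhere in the list produces chunkRec of the suffix
theorem mainA (n : Int) (l : List Int) (s : Int) (d : List Int) (h : s + l.length = n) :
    (PySem.List.enumerate l s).foldl (stepA n) (d, 0, 0) = (d ++ chunkRec l, 0, 0) := by
  induction hlen : l.length using Nat.strong_induction_on generalizing l s d with
  | _ m ih =>
    subst hlen
    by_cases hl : l = []
    · subst hl
      rw [chunkRec]
      simp [PySem.List.enumerate_nil]
    · have hsplit : l = l.take 7 ++ l.drop 7 := (List.take_append_drop 7 l).symm
      have hgne : l.take 7 ≠ [] := by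
        cases l with
        | nil => exact absurd rfl hl
        | cons a t => simp [List.take]
      have hglen : (l.take 7).length = min 7 l.length := List.length_take
      conv_lhs => rw [hsplit]
      rw [PySem.List.enumerate_append, List.foldl_append]
      rw [runGroup n (l.take 7) s 0 0 d hgne ?_ ?_ ?_]
      · rw [ih (l.drop 7).length ?_ (l.drop 7) _ _ ?_ rfl]
        · conv_rhs => rw [chunkRec]
          rw [if_neg hl]
          simp
        · have : l.length ≠ 0 := by simpa using hl
          simp only [List.length_drop]; omega
        · simp only [List.length_drop]
          omega
      · by_cases h7 : 7 ≤ l.length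
        · left; rw [hglen]; push_cast; omega
        · right
          have ht : (l.take 7).length = l.length := by omega
          rw [ht]; exact h
      · rw [hglen]; push_cast; omega
      · have hle : (l.take 7).length ≤ l.length := by omega
        omega

theorem alt_eq_chunk (xs : List Int) : encode7_alt xs = chunkRec xs := by
  unfold encode7_alt
  have h := altLoop xs 0 [] le_rfl
  simpa using h

-- ===== VERDICT (by name: the statement is the Claim_ definition above) =====
theorem encode7_spec : Claim_equal_encode7 := by
  intro srcbytes _
  unfold Spec_encode7 encode7
  rw [alt_eq_chunk]
  have h := congrArg Prod.fst (mainA (srcbytes.length : Int) srcbytes 0 [] (by simp))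
  simp only [List.nil_append] at h
  exact h
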